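-- pv_equiv track=rewrite | github.com/kanhaiya-gupta/AASX-Digital | src/twin_registry/populator/phase1_upload_populator.py | _determine_twin_category
-- ===== SOURCE A (Python) =====
-- from typing import Dict, Any, Optional
--
-- def _determine_twin_category(file_name: str, file_metadata: Optional[Dict[str, Any]]) -> str:
--     """Determine twin category based on filename and metadata."""
--     if file_metadata and "twin_category" in file_metadata:
--         return file_metadata["twin_category"]
--
--     # Simple heuristics based on filename
--     file_lower = file_name.lower()
--
--     if any(word in file_lower for word in ["manufacturing", "production", "factory"]):
--         return "manufacturing"
--     elif any(word in file_lower for word in ["energy", "power", "solar", "wind"]):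
--         return "energy"
--     elif any(word in file_lower for word in ["component", "part", "assembly"]):
--         return "component"
--     elif any(word in file_lower for word in ["facility", "building", "plant"]):
--         return "facility"
--     elif any(word in file_lower for word in ["process", "workflow", "pipeline"]):
--         return "process"
--     else:
--         return "generic"
-- ===== SOURCE B (Python) =====
-- from typing import Dict, Any, Optional
--
-- # Flat map from trigger keyword to its category.
-- KEYWORD_CATEGORY = {
--     "manufacturing": "manufacturing", "production": "manufacturing", "factory": "manufacturing",
--     "energy": "energy", "power": "energy", "solar": "energy", "wind": "energy",
--     "component": "component", "part": "component", "assembly": "component",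
--     "facility": "facility", "building": "facility", "plant": "facility",
--     "process": "process", "workflow": "process", "pipeline": "process",
-- }
--
-- # Rank of each category; lower wins. "generic" is the worst-ranked default.
-- PRIORITY = {"manufacturing": 0, "energy": 1, "component": 2,
--             "facility": 3, "process": 4, "generic": 5}
--
-- def _determine_twin_category(file_name: str, file_metadata: Optional[Dict[str, Any]]) -> str:
--     if file_metadata and "twin_category" in file_metadata:
--         return file_metadata["twin_category"]
--     file_lower = file_name.lower()
--     best = "generic"
--     for word, category in KEYWORD_CATEGORY.items():
--         if word in file_lower and PRIORITY[category] < PRIORITY[best]: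
--             best = category
--     return best
-- ===== Notes on version B (the rewrite author's own statement) =====
-- stated objective: alternative
-- what changed: Replaces the five-branch if/elif any() chain with a single argmin pass: one flat keyword-to-category map is scanned once while a best-so-far accumulator keeps the matched category of minimal priority rank, returned at the end.
import Mathlib
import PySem

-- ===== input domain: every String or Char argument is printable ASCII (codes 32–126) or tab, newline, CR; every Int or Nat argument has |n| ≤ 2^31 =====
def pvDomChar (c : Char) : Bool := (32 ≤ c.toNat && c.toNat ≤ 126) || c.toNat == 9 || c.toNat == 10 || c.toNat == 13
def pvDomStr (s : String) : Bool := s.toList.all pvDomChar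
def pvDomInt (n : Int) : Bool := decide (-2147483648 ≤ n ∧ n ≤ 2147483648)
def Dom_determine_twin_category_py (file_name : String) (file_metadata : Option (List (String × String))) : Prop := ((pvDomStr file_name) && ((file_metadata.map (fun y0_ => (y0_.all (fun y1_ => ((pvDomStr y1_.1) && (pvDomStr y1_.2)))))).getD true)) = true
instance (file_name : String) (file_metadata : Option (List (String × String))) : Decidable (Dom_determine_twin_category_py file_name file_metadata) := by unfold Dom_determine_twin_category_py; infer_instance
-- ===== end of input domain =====

-- B replaces the five-branch if/elif any() chain by one argmin pass over a flat keyword→category map with a best-priority accumulator; same results, alternative decomposition.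


-- ===== PORT A =====
def determine_twin_category_py (file_name : String) (file_metadata : Option (List (String × String))) : String :=
  -- 'if file_metadata and "twin_category" in file_metadata': truthy = Some nonempty list
  match file_metadata with
  | some md =>
    if md ≠ [] ∧ (PySem.Dict.mk md).contains "twin_category" then
      (PySem.Dict.mk md).getD "twin_category" ""
    else
      let file_lower := PySem.Str.lower file_name
      if ["manufacturing", "production", "factory"].any (fun w => PySem.Str.isIn w file_lower) then "manufacturing"
      else if ["energy", "power", "solar", "wind"].any (fun w => PySem.Str.isIn w file_lower) then "energy"
      else if ["component", "part", "assembly"].any (fun w => PySem.Str.isIn w file_lower) then "component"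
      else if ["facility", "building", "plant"].any (fun w => PySem.Str.isIn w file_lower) then "facility"
      else if ["process", "workflow", "pipeline"].any (fun w => PySem.Str.isIn w file_lower) then "process"
      else "generic"
  | none =>
      let file_lower := PySem.Str.lower file_name
      if ["manufacturing", "production", "factory"].any (fun w => PySem.Str.isIn w file_lower) then "manufacturing"
      else if ["energy", "power", "solar", "wind"].any (fun w => PySem.Str.isIn w file_lower) then "energy"
      else if ["component", "part", "assembly"].any (fun w => PySem.Str.isIn w file_lower) then "component"
      else if ["facility", "building", "plant"].any (fun w => PySem.Str.isIn w file_lower) then "facility"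
      else if ["process", "workflow", "pipeline"].any (fun w => PySem.Str.isIn w file_lower) then "process"
      else "generic"

-- ===== PORT B =====
-- KEYWORD_CATEGORY.items(): flat (keyword, category) pairs in insertion order
def twinKeywordCategory : List (String × String) :=
  [("manufacturing", "manufacturing"), ("production", "manufacturing"), ("factory", "manufacturing"),
   ("energy", "energy"), ("power", "energy"), ("solar", "energy"), ("wind", "energy"),
   ("component", "component"), ("part", "component"), ("assembly", "component"),
   ("facility", "facility"), ("building", "facility"), ("plant", "facility"),
   ("process", "process"), ("workflow", "process"), ("pipeline", "process")]

-- PRIORITY dict (lookup only ever hits present keys, so getD with any default is exact)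
def twinPriority : PySem.Dict String Int :=
  PySem.Dict.mk [("manufacturing", 0), ("energy", 1), ("component", 2),
                 ("facility", 3), ("process", 4), ("generic", 5)]

def determine_twin_category_py_alt (file_name : String) (file_metadata : Option (List (String × String))) : String :=
  match file_metadata with
  | some md =>
    if md ≠ [] ∧ (PySem.Dict.mk md).contains "twin_category" then
      (PySem.Dict.mk md).getD "twin_category" ""
    else
      let file_lower := PySem.Str.lower file_name
      twinKeywordCategory.foldl (fun best wc =>
        if PySem.Str.isIn wc.1 file_lower ∧ twinPriority.getD wc.2 0 < twinPriority.getD best 0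
        then wc.2 else best) "generic"
  | none =>
      let file_lower := PySem.Str.lower file_name
      twinKeywordCategory.foldl (fun best wc =>
        if PySem.Str.isIn wc.1 file_lower ∧ twinPriority.getD wc.2 0 < twinPriority.getD best 0
        then wc.2 else best) "generic"

-- ===== PRECONDITION & SPEC =====
def Spec_determine_twin_category_py (file_name : String) (file_metadata : Option (List (String × String))) (out : String) : Prop := out = determine_twin_category_py_alt file_name file_metadata
instance (file_name : String) (file_metadata : Option (List (String × String))) (out : String) : Decidable (Spec_determine_twin_category_py file_name file_metadata out) := by unfold Spec_determine_twin_category_py; infer_instance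

-- ===== CLAIM (what is proved, stated in full; the proofs are below) =====
def Claim_equal_determine_twin_category_py : Prop := ∀ (file_name : String) (file_metadata : Option (List (String × String))), Dom_determine_twin_category_py file_name file_metadata → Spec_determine_twin_category_py file_name file_metadata (determine_twin_category_py file_name file_metadata)

-- ===== LEMMAS AND PROOFS =====
-- the chain and the argmin fold agree for every lowered file name
theorem twin_chain_eq_fold (fl : String) :
    (if ["manufacturing", "production", "factory"].any (fun w => PySem.Str.isIn w fl) then "manufacturing"
     else if ["energy", "power", "solar", "wind"].any (fun w => PySem.Str.isIn w fl) then "energy"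
     else if ["component", "part", "assembly"].any (fun w => PySem.Str.isIn w fl) then "component"
     else if ["facility", "building", "plant"].any (fun w => PySem.Str.isIn w fl) then "facility"
     else if ["process", "workflow", "pipeline"].any (fun w => PySem.Str.isIn w fl) then "process"
     else "generic")
    = twinKeywordCategory.foldl (fun best wc =>
        if PySem.Str.isIn wc.1 fl ∧ twinPriority.getD wc.2 0 < twinPriority.getD best 0
        then wc.2 else best) "generic" := by
  by_cases h1 : PySem.Chars.isIn ['m', 'a', 'n', 'u', 'f', 'a', 'c', 't', 'u', 'r', 'i', 'n', 'g'] fl.toList = true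
  · simp [twinKeywordCategory, twinPriority, PySem.Dict.getD, PySem.Dict.get?, h1]
  by_cases h2 : PySem.Chars.isIn ['p', 'r', 'o', 'd', 'u', 'c', 't', 'i', 'o', 'n'] fl.toList = true
  · simp [twinKeywordCategory, twinPriority, PySem.Dict.getD, PySem.Dict.get?, h1, h2]
  by_cases h3 : PySem.Chars.isIn ['f', 'a', 'c', 't', 'o', 'r', 'y'] fl.toList = true
  · simp [twinKeywordCategory, twinPriority, PySem.Dict.getD, PySem.Dict.get?, h1, h2, h3]
  by_cases h4 : PySem.Chars.isIn ['e', 'n', 'e', 'r', 'g', 'y'] fl.toList = true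
  · simp [twinKeywordCategory, twinPriority, PySem.Dict.getD, PySem.Dict.get?, h1, h2, h3, h4]
  by_cases h5 : PySem.Chars.isIn ['p', 'o', 'w', 'e', 'r'] fl.toList = true
  · simp [twinKeywordCategory, twinPriority, PySem.Dict.getD, PySem.Dict.get?, h1, h2, h3, h4, h5]
  by_cases h6 : PySem.Chars.isIn ['s', 'o', 'l', 'a', 'r'] fl.toList = true
  · simp [twinKeywordCategory, twinPriority, PySem.Dict.getD, PySem.Dict.get?, h1, h2, h3, h4, h5, h6]
  by_cases h7 : PySem.Chars.isIn ['w', 'i', 'n', 'd'] fl.toList = true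
  · simp [twinKeywordCategory, twinPriority, PySem.Dict.getD, PySem.Dict.get?, h1, h2, h3, h4, h5, h6, h7]
  by_cases h8 : PySem.Chars.isIn ['c', 'o', 'm', 'p', 'o', 'n', 'e', 'n', 't'] fl.toList = true
  · simp [twinKeywordCategory, twinPriority, PySem.Dict.getD, PySem.Dict.get?, h1, h2, h3, h4, h5, h6, h7, h8]
  by_cases h9 : PySem.Chars.isIn ['p', 'a', 'r', 't'] fl.toList = true
  · simp [twinKeywordCategory, twinPriority, PySem.Dict.getD, PySem.Dict.get?, h1, h2, h3, h4, h5, h6, h7, h8, h9]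
  by_cases h10 : PySem.Chars.isIn ['a', 's', 's', 'e', 'm', 'b', 'l', 'y'] fl.toList = true
  · simp [twinKeywordCategory, twinPriority, PySem.Dict.getD, PySem.Dict.get?, h1, h2, h3, h4, h5, h6, h7, h8, h9, h10]
  by_cases h11 : PySem.Chars.isIn ['f', 'a', 'c', 'i', 'l', 'i', 't', 'y'] fl.toList = true
  · simp [twinKeywordCategory, twinPriority, PySem.Dict.getD, PySem.Dict.get?, h1, h2, h3, h4, h5, h6, h7, h8, h9, h10, h11]
  by_cases h12 : PySem.Chars.isIn ['b', 'u', 'i', 'l', 'd', 'i', 'n', 'g'] fl.toList = true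
  · simp [twinKeywordCategory, twinPriority, PySem.Dict.getD, PySem.Dict.get?, h1, h2, h3, h4, h5, h6, h7, h8, h9, h10, h11, h12]
  by_cases h13 : PySem.Chars.isIn ['p', 'l', 'a', 'n', 't'] fl.toList = true
  · simp [twinKeywordCategory, twinPriority, PySem.Dict.getD, PySem.Dict.get?, h1, h2, h3, h4, h5, h6, h7, h8, h9, h10, h11, h12, h13]
  by_cases h14 : PySem.Chars.isIn ['p', 'r', 'o', 'c', 'e', 's', 's'] fl.toList = true
  · simp [twinKeywordCategory, twinPriority, PySem.Dict.getD, PySem.Dict.get?, h1, h2, h3, h4, h5, h6, h7, h8, h9, h10, h11, h12, h13, h14]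
  by_cases h15 : PySem.Chars.isIn ['w', 'o', 'r', 'k', 'f', 'l', 'o', 'w'] fl.toList = true
  · simp [twinKeywordCategory, twinPriority, PySem.Dict.getD, PySem.Dict.get?, h1, h2, h3, h4, h5, h6, h7, h8, h9, h10, h11, h12, h13, h14, h15]
  by_cases h16 : PySem.Chars.isIn ['p', 'i', 'p', 'e', 'l', 'i', 'n', 'e'] fl.toList = true
  · simp [twinKeywordCategory, twinPriority, PySem.Dict.getD, PySem.Dict.get?, h1, h2, h3, h4, h5, h6, h7, h8, h9, h10, h11, h12, h13, h14, h15, h16]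
  simp [twinKeywordCategory, twinPriority, PySem.Dict.getD, PySem.Dict.get?, h1, h2, h3, h4, h5, h6, h7, h8, h9, h10, h11, h12, h13, h14, h15, h16]

-- ===== VERDICT (by name: the statement is the Claim_ definition above) =====
theorem determine_twin_category_py_spec : Claim_equal_determine_twin_category_py := by
  intro file_name file_metadata _
  unfold Spec_determine_twin_category_py determine_twin_category_py determine_twin_category_py_alt
  cases file_metadata with
  | none => exact twin_chain_eq_fold _
  | some md =>
    by_cases h : md ≠ [] ∧ (PySem.Dict.mk md).contains "twin_category"
    · simp [h]
    · simp only [if_neg h]; exact twin_chain_eq_fold _
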